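-- pv_equiv track=rewrite | github.com/Luzkan/Metaheuristics | TaskList1/3/3.py | neighborhoodSearch
-- ===== SOURCE A (Python) =====
-- import copy
--
-- def neighborhoodSearch(solution):
--     neigh_answ_list = []
--
--     # Iterate on all moves (besides ending move - there's one way to get into the wall)
--     # Get indexes of two moves "n" and "k"
--     # Version: "Vertices Swap"
--     for idn, n in enumerate(solution[:-1]):
--         for idk, k in enumerate(solution[:-1]):
--
--             # Skip when interchaning move with itself
--             if n == k:
--                 continue
--
--             # On new list perform swap of n and k
--             new_answ = copy.deepcopy(solution)
--             new_answ[idn], new_answ[idk] = k, n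
--
--             # Add it, if it's not present in the list
--             if new_answ not in neigh_answ_list:
--                 neigh_answ_list.append(new_answ)
--
--     # Sort List based on the distance
--     neigh_answ_list_sorted = sorted(neigh_answ_list, key=len)
--     return neigh_answ_list_sorted
-- ===== SOURCE B (Python) =====
-- def neighborhoodSearch(solution):
--     # Triangular scan: each unordered pair of distinct-valued positions once,
--     # in first-seen (lexicographic) order; lengths are all equal so no sort needed.
--     neighbors = []
--     n = len(solution) - 1
--     for i in range(n):
--         for j in range(i + 1, n):
--             if solution[i] != solution[j]:
--                 new_answ = list(solution)
--                 new_answ[i], new_answ[j] = new_answ[j], new_answ[i]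
--                 neighbors.append(new_answ)
--     return neighbors
-- ===== Notes on version B (the rewrite author's own statement) =====
-- stated objective: faster
-- what changed: Replaces the full n*n double loop with membership-based dedup plus a final stable sort by a triangular i<j scan that emits each swap exactly once in first-seen order, with no dedup scan and no sort.
import Mathlib
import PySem

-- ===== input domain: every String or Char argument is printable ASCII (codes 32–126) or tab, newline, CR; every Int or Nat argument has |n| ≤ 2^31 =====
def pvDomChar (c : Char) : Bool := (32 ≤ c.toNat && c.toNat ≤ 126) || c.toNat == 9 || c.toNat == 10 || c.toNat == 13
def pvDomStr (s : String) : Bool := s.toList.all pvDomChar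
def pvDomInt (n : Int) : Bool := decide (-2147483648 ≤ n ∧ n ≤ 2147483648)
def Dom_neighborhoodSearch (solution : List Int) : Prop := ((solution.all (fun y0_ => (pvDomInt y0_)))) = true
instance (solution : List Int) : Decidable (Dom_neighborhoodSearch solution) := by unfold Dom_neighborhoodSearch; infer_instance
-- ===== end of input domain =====

-- B replaces A's full double loop + list-membership dedup + stable sort-by-length with a single
-- triangular i<j scan that emits each swap exactly once in first-seen order (no membership-dedup scan, no sort).


-- ===== PORT A =====
-- Literal transliteration of A: double loop over enumerate(solution[:-1]), value-equality skip,
-- swap on a copy, append only if not already present, then stable sort by len.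
def neighborhoodSearch (solution : List Int) : List (List Int) :=
  let base := PySem.List.slice solution none (some (-1))
  let neighAnswList :=
    (PySem.List.enumerate base).foldl (fun acc1 np =>
      (PySem.List.enumerate base).foldl (fun acc2 kp =>
        if np.2 == kp.2 then acc2
        else
          let newAnsw := PySem.List.pySetD (PySem.List.pySetD solution np.1 kp.2) kp.1 np.2
          if newAnsw ∈ acc2 then acc2 else acc2 ++ [newAnsw]) acc1) ([] : List (List Int))
  PySem.List.sorted neighAnswList (fun l => (l.length : Int))

-- ===== PORT B =====
-- Literal transliteration of B: triangular scan i < j < len-1, swap when values differ, append.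
def neighborhoodSearch_alt (solution : List Int) : List (List Int) :=
  let n : Int := (solution.length : Int) - 1
  (PySem.List.pyRange 0 n).foldl (fun acc1 i =>
    (PySem.List.pyRange (i+1) n).foldl (fun acc2 j =>
      if PySem.List.pyGetD solution i 0 != PySem.List.pyGetD solution j 0 then
        acc2 ++ [PySem.List.pySetD (PySem.List.pySetD solution i (PySem.List.pyGetD solution j 0)) j (PySem.List.pyGetD solution i 0)]
      else acc2) acc1) ([] : List (List Int))

-- ===== PRECONDITION & SPEC =====
def Spec_neighborhoodSearch (solution : List Int) (out : List (List Int)) : Prop := out = neighborhoodSearch_alt solution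
instance (solution : List Int) (out : List (List Int)) : Decidable (Spec_neighborhoodSearch solution out) := by unfold Spec_neighborhoodSearch; infer_instance

-- ===== CLAIM (what is proved, stated in full; the proofs are below) =====
def Claim_equal_neighborhoodSearch : Prop := ∀ (solution : List Int), Dom_neighborhoodSearch solution → Spec_neighborhoodSearch solution (neighborhoodSearch solution)

-- ===== LEMMAS AND PROOFS =====

-- The swapped copy produced for the position pair (i, j).
def pvSw (s : List Int) (i j : Nat) : List Int := (s.set i (s.getD j 0)).set j (s.getD i 0)

-- B's row for outer index i, truncated at inner bound c (c = m gives the full row).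
def pvRowTo (s : List Int) (i c : Nat) : List (List Int) :=
  ((List.range' (i+1) (c - (i+1))).filter (fun j => s.getD i 0 != s.getD j 0)).map (pvSw s i)

-- Rows 0 .. i-1 concatenated: the triangular result so far.
def pvTri (s : List Int) (m i : Nat) : List (List Int) :=
  (List.range i).flatMap (fun a => pvRowTo s a m)

-- A's inner-loop step, after index bookkeeping is reduced to Nat.
def pvStepA (s : List Int) (i : Nat) (acc : List (List Int)) (j : Nat) : List (List Int) :=
  if s.getD i 0 = s.getD j 0 then acc
  else if pvSw s i j ∈ acc then acc else acc ++ [pvSw s i j]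

theorem pvSw_length (s : List Int) (i j : Nat) : (pvSw s i j).length = s.length := by
  simp [pvSw]

theorem pvSw_symm (s : List Int) (i j : Nat) : pvSw s i j = pvSw s j i := by
  by_cases h : i = j
  · simp [pvSw, h]
  · show (s.set i (s.getD j 0)).set j (s.getD i 0) = (s.set j (s.getD i 0)).set i (s.getD j 0)
    exact List.set_comm _ _ h

theorem pvSw_getD (s : List Int) (i j p : Nat) (_hi : i < s.length) (hp : p < s.length) :
    (pvSw s i j).getD p 0 = if j = p then s.getD i 0 else if i = p then s.getD j 0 else s.getD p 0 := by
  have h1 : p < ((s.set i (s.getD j 0)).set j (s.getD i 0)).length := by simpa using hp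
  rw [pvSw, List.getD_eq_getElem _ _ h1, List.getElem_set]
  split_ifs with h2 h3
  · rfl
  · rw [List.getElem_set, if_pos h3]
  · rw [List.getElem_set, if_neg h3, List.getD_eq_getElem _ _ hp]

theorem pvSw_inj (s : List Int) (i j i' j' : Nat) (hij : i < j) (hij' : i' < j')
    (hj : j < s.length) (hj' : j' < s.length)
    (hv : s.getD i 0 ≠ s.getD j 0) (hv' : s.getD i' 0 ≠ s.getD j' 0)
    (h : pvSw s i j = pvSw s i' j') : i = i' ∧ j = j' := by
  have hi : i < s.length := lt_trans hij hj
  have hi' : i' < s.length := lt_trans hij' hj'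
  have c1 : (pvSw s i j).getD i 0 = (pvSw s i' j').getD i 0 := by rw [h]
  have c2 : (pvSw s i j).getD j 0 = (pvSw s i' j').getD j 0 := by rw [h]
  rw [pvSw_getD s i j i hi hi, pvSw_getD s i' j' i hi' hi] at c1
  rw [pvSw_getD s i j j hi hj, pvSw_getD s i' j' j hi' hj] at c2
  rw [if_neg (by omega), if_pos rfl] at c1
  rw [if_pos rfl] at c2
  by_cases hii : i = i'
  · subst hii
    constructor
    · rfl
    · split_ifs at c2 with a b
      · omega
      · omega
      · exact absurd c2 hv
  · have hji : j' = i := by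
      by_contra hne
      rw [if_neg hne] at c1
      split_ifs at c1 with b
      · exact hii b.symm
      · exact hv c1.symm
    have : i' = j := by
      split_ifs at c2 with a b
      · omega
      · exact b
      · exact absurd c2 hv
    omega

theorem pvMem_rowTo (s : List Int) (i c : Nat) (x : List Int) :
    x ∈ pvRowTo s i c ↔ ∃ j, i < j ∧ j < c ∧ s.getD i 0 ≠ s.getD j 0 ∧ x = pvSw s i j := by
  simp only [pvRowTo, List.mem_map, List.mem_filter, List.mem_range'_1, bne_iff_ne, ne_eq]
  constructor
  · rintro ⟨j, ⟨⟨h1, h2⟩, h3⟩, rfl⟩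
    exact ⟨j, by omega, by omega, h3, rfl⟩
  · rintro ⟨j, h1, h2, h3, rfl⟩
    exact ⟨j, ⟨⟨by omega, by omega⟩, h3⟩, rfl⟩

theorem pvMem_tri (s : List Int) (m i : Nat) (x : List Int) :
    x ∈ pvTri s m i ↔ ∃ a b, a < i ∧ a < b ∧ b < m ∧ s.getD a 0 ≠ s.getD b 0 ∧ x = pvSw s a b := by
  simp only [pvTri, List.mem_flatMap, List.mem_range, pvMem_rowTo]
  constructor
  · rintro ⟨a, ha, j, h1, h2, h3, rfl⟩
    exact ⟨a, j, ha, h1, h2, h3, rfl⟩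
  · rintro ⟨a, b, h0, h1, h2, h3, rfl⟩
    exact ⟨a, h0, b, h1, h2, h3, rfl⟩

theorem pvRowTo_zero (s : List Int) (i : Nat) : pvRowTo s i 0 = [] := by
  simp [pvRowTo]

-- one inner step keeps the truncated row when the column is skipped
theorem pvRowTo_succ_skip (s : List Int) (i c : Nat) (h : c ≤ i ∨ s.getD i 0 = s.getD c 0) :
    pvRowTo s i (c+1) = pvRowTo s i c := by
  rcases h with h | h
  · have : c + 1 - (i+1) = 0 := by omega
    have : c - (i+1) = 0 := by omega
    simp_all [pvRowTo]
  · by_cases hic : c ≤ i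
    · have e1 : c + 1 - (i+1) = 0 := by omega
      have e2 : c - (i+1) = 0 := by omega
      simp [pvRowTo, e1, e2]
    · have e1 : c + 1 - (i+1) = (c - (i+1)) + 1 := by omega
      rw [pvRowTo, e1, List.range'_concat]
      have e2 : i + 1 + 1 * (c - (i + 1)) = c := by omega
      have h' : (s.getD i 0 != s.getD c 0) = false := by simpa using h
      rw [e2, List.filter_append, List.filter_singleton, h']
      simp [pvRowTo]

-- one inner step extends the truncated row when the column is taken
theorem pvRowTo_succ_add (s : List Int) (i c : Nat) (hic : i < c) (hv : s.getD i 0 ≠ s.getD c 0) :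
    pvRowTo s i (c+1) = pvRowTo s i c ++ [pvSw s i c] := by
  have e1 : c + 1 - (i+1) = (c - (i+1)) + 1 := by omega
  rw [pvRowTo, e1, List.range'_concat]
  have e2 : i + 1 + 1 * (c - (i + 1)) = c := by omega
  have h' : (s.getD i 0 != s.getD c 0) = true := by simpa using hv
  rw [e2, List.filter_append, List.filter_singleton, h']
  simp [pvRowTo]

-- A's inner loop, processed from column c on, completes row i on top of the triangle so far.
theorem pvInnerA (s : List Int) (m i : Nat) (hm : m ≤ s.length) (hi : i < m) :
    ∀ (k c : Nat), c + k = m →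
      (List.range' c k).foldl (pvStepA s i) (pvTri s m i ++ pvRowTo s i c)
        = pvTri s m i ++ pvRowTo s i m := by
  intro k
  induction k with
  | zero => intro c hc; simp only [List.range'_zero, List.foldl_nil]; rw [(by omega : c = m)]
  | succ k ih =>
    intro c hc
    rw [List.range'_succ, List.foldl_cons]
    have hstep : pvStepA s i (pvTri s m i ++ pvRowTo s i c) c
        = pvTri s m i ++ pvRowTo s i (c+1) := by
      by_cases hveq : s.getD i 0 = s.getD c 0
      · rw [pvStepA, if_pos hveq, pvRowTo_succ_skip s i c (Or.inr hveq)]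
      · rw [pvStepA, if_neg hveq]
        by_cases hci : c < i
        · have hmem : pvSw s i c ∈ pvTri s m i := by
            rw [pvSw_symm, pvMem_tri]
            exact ⟨c, i, hci, hci, hi, fun e => hveq e.symm, rfl⟩
          rw [if_pos (List.mem_append.mpr (Or.inl hmem)),
              pvRowTo_succ_skip s i c (Or.inl (by omega))]
        · have hic : i < c := by
            rcases Nat.lt_trichotomy i c with h | h | h
            · exact h
            · exact absurd (h ▸ rfl) hveq
            · omega
          have hnmem : pvSw s i c ∉ pvTri s m i ++ pvRowTo s i c := by
            intro hmem
            rcases List.mem_append.mp hmem with h | h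
            · rw [pvMem_tri] at h
              obtain ⟨a, b, ha, hab, hbm, hvab, he⟩ := h
              have := pvSw_inj s i c a b hic hab (by omega) (by omega) hveq hvab he
              omega
            · rw [pvMem_rowTo] at h
              obtain ⟨j, hij, hjc, hvj, he⟩ := h
              have := pvSw_inj s i c i j hic hij (by omega) (by omega) hveq hvj he
              omega
          rw [if_neg hnmem, pvRowTo_succ_add s i c hic hveq, List.append_assoc]
    rw [hstep]
    exact ih (c+1) (by omega)

-- A's whole double loop builds exactly the triangle.
theorem pvOuterA (s : List Int) (m : Nat) (hm : m ≤ s.length) :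
    ∀ i, i ≤ m →
      (List.range i).foldl (fun acc a => (List.range m).foldl (pvStepA s a) acc) []
        = pvTri s m i := by
  intro i
  induction i with
  | zero => intro _; simp [pvTri]
  | succ i ih =>
    intro hi
    rw [List.range_succ, List.foldl_append, ih (by omega), List.foldl_cons, List.foldl_nil]
    have h0 : pvTri s m i = pvTri s m i ++ pvRowTo s i 0 := by rw [pvRowTo_zero]; simp
    rw [h0, List.range_eq_range']
    rw [pvInnerA s m i hm (by omega) m 0 (by omega)]
    have h2 : pvTri s m (i+1) = pvTri s m i ++ pvRowTo s i m := by
      show (List.range (i+1)).flatMap (fun a => pvRowTo s a m) = _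
      rw [List.range_succ, List.flatMap_append]
      simp [pvTri]
    rw [h2]

theorem pvGetD_dropLast (s : List Int) (a : Nat) (ha : a < s.length - 1) :
    s.dropLast.getD a 0 = s.getD a 0 := by
  rw [List.getD_eq_getElem _ _ (by simpa using ha), List.getD_eq_getElem _ _ (by omega),
    List.getElem_dropLast]

theorem pvPyRange_natCast : ∀ (k a b : Nat), b - a = k →
    PySem.List.pyRange (a : Int) (b : Int) = (List.range' a k).map (Nat.cast : Nat → Int) := by
  intro k
  induction k with
  | zero =>
    intro a b h
    rw [List.range'_zero, List.map_nil]
    exact PySem.List.pyRange_one_eq_nil (by exact_mod_cast Nat.le_of_sub_eq_zero h)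
  | succ k ih =>
    intro a b h
    rw [PySem.List.pyRange_one_cons (by exact_mod_cast (by omega : a < b)),
      (by push_cast; ring : ((a : Int) + 1) = ((a + 1 : Nat) : Int)), ih (a+1) b (by omega),
      List.range'_succ, List.map_cons]

-- A's port, reduced to the Nat-indexed double loop and the final sort.
theorem pvA_eq (s : List Int) :
    neighborhoodSearch s
      = PySem.List.sorted
          ((List.range (s.length - 1)).foldl
            (fun acc a => (List.range (s.length - 1)).foldl (pvStepA s a) acc) [])
          (fun l => (l.length : Int)) := by
  show PySem.List.sorted _ _ = _
  congr 1
  rw [PySem.List.slice_to_neg_one, PySem.List.enumerate_eq_map_pyRange s.dropLast 0,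
      (by simp [PySem.List.len] : PySem.List.len s.dropLast = ((s.length - 1 : Nat) : Int)),
      PySem.List.pyRange_zero_natCast, List.foldl_map]
  simp only [List.foldl_map]
  apply PySem.List.foldl_congr_mem
  intro acc1 a ha
  apply PySem.List.foldl_congr_mem
  intro acc2 b hb
  rw [List.mem_range] at ha hb
  simp only [PySem.List.pyGetD_natCast, PySem.List.pySetD_natCast,
    pvGetD_dropLast s a ha, pvGetD_dropLast s b hb, pvStepA, pvSw, beq_iff_eq]

-- B's port is the triangle.
theorem pvB_eq (s : List Int) :
    neighborhoodSearch_alt s = pvTri s (s.length - 1) (s.length - 1) := by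
  by_cases h0 : s.length = 0
  · rw [List.eq_nil_of_length_eq_zero h0]; rfl
  · show (PySem.List.pyRange 0 ((s.length : Int) - 1)).foldl _ _ = _
    rw [(by push_cast [Nat.cast_sub (by omega : 1 ≤ s.length)]; ring :
          ((s.length : Int) - 1) = ((s.length - 1 : Nat) : Int)),
      PySem.List.pyRange_zero_natCast, List.foldl_map]
    have hin : ∀ (a : Nat) (acc : List (List Int)), a ∈ List.range (s.length - 1) →
        (PySem.List.pyRange ((a : Int) + 1) ((s.length - 1 : Nat) : Int)).foldl
          (fun acc2 j =>
            if PySem.List.pyGetD s (a : Int) 0 != PySem.List.pyGetD s j 0 then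
              acc2 ++ [PySem.List.pySetD (PySem.List.pySetD s (a : Int) (PySem.List.pyGetD s j 0)) j (PySem.List.pyGetD s (a : Int) 0)]
            else acc2) acc
        = acc ++ pvRowTo s a (s.length - 1) := by
      intro a acc _
      rw [(by push_cast; ring : ((a : Int) + 1) = ((a + 1 : Nat) : Int)),
        pvPyRange_natCast (s.length - 1 - (a+1)) (a+1) (s.length - 1) rfl, List.foldl_map]
      simp only [PySem.List.pyGetD_natCast, PySem.List.pySetD_natCast]
      exact PySem.List.foldl_append_if (fun j => s.getD a 0 != s.getD j 0) (pvSw s a) _ acc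
    rw [PySem.List.foldl_congr_mem _ _ (fun acc a => acc ++ pvRowTo s a (s.length - 1)) _
        (fun acc x hx => hin x acc hx)]
    rw [PySem.List.foldl_append_eq_flatMap]
    rfl

-- ===== VERDICT (by name: the statement is the Claim_ definition above) =====
theorem neighborhoodSearch_spec : Claim_equal_neighborhoodSearch := by
  intro s _
  show neighborhoodSearch s = neighborhoodSearch_alt s
  rw [pvA_eq, pvB_eq, pvOuterA s (s.length - 1) (by omega) (s.length - 1) le_rfl]
  apply PySem.List.sorted_eq_self_of_pairwise
  apply List.pairwise_of_forall_mem_list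
  intro a ha b hb
  rw [pvMem_tri] at ha hb
  obtain ⟨_, _, _, _, _, _, rfl⟩ := ha
  obtain ⟨_, _, _, _, _, _, rfl⟩ := hb
  simp [pvSw_length]
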